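-- pv_equiv track=rewrite | github.com/CharlesLuoquan/knowledge | testPY/studyTotal/study8.py | reOrderArray
-- ===== SOURCE A (Python) =====
-- def reOrderArray(array):
--     # write code here
--     J = []
--     O = []
--     L = []
--     for i in range(len(array)):
--         if array[i]%2 == 0:
--             J.append(array[i])
--         else:
--             O.append(array[i])
--     return sorted(O)+sorted(J)
-- ===== SOURCE B (Python) =====
-- def reOrderArray(array):
--     s = sorted(array)
--     odds, evens = [], []
--     for x in s:
--         (odds if x % 2 != 0 else evens).append(x)
--     return odds + evens
-- ===== Notes on version B (the rewrite author's own statement) =====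
-- stated objective: simpler
-- what changed: Sort the whole list once, then partition the sorted list into odds and evens in a single pass, instead of partitioning first and sorting the two halves separately.
import Mathlib
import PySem

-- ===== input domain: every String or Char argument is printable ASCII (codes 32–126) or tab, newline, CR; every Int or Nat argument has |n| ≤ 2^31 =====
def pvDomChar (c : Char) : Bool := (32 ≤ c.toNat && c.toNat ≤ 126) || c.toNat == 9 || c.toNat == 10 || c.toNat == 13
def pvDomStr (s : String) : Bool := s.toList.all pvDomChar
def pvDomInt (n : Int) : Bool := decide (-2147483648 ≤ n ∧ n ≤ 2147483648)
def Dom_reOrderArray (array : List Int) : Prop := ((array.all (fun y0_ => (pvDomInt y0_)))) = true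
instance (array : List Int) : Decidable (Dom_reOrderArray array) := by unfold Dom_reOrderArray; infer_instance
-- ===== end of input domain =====

-- B changes the decomposition: one sort of the whole list, then a single partition pass (simpler); A partitions first and sorts each half.

-- ===== PORT A =====
def reOrderArray (array : List Int) : List Int :=
  let st := (PySem.List.pyRange 0 (array.length : Int) 1).foldl
    (fun (s : List Int × List Int) i =>
      if PySem.Int.mod (PySem.List.pyGetD array i 0) 2 = 0 then
        (s.1 ++ [PySem.List.pyGetD array i 0], s.2)
      else
        (s.1, s.2 ++ [PySem.List.pyGetD array i 0]))
    ([], [])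
  PySem.List.sorted st.2 (fun x => x) false ++ PySem.List.sorted st.1 (fun x => x) false

-- ===== PORT B =====
def reOrderArray_alt (array : List Int) : List Int :=
  let s := PySem.List.sorted array (fun x => x) false
  let st := s.foldl
    (fun (p : List Int × List Int) x =>
      if PySem.Int.mod x 2 ≠ 0 then (p.1 ++ [x], p.2) else (p.1, p.2 ++ [x]))
    ([], [])
  st.1 ++ st.2

-- ===== PRECONDITION & SPEC =====
def Spec_reOrderArray (array : List Int) (out : List Int) : Prop := out = reOrderArray_alt array
instance (array : List Int) (out : List Int) : Decidable (Spec_reOrderArray array out) := by unfold Spec_reOrderArray; infer_instance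

-- ===== CLAIM (what is proved, stated in full; the proofs are below) =====
def Claim_equal_reOrderArray : Prop := ∀ (array : List Int), Dom_reOrderArray array → Spec_reOrderArray array (reOrderArray array)

-- ===== LEMMAS AND PROOFS =====

-- a foldl that appends each element to one of two lists is a pair of filters
theorem foldl_partition (p : Int → Prop) [DecidablePred p] :
    ∀ (xs a b : List Int),
      xs.foldl (fun (s : List Int × List Int) x =>
          if p x then (s.1 ++ [x], s.2) else (s.1, s.2 ++ [x])) (a, b)
        = (a ++ xs.filter (fun x => decide (p x)),
           b ++ xs.filter (fun x => !decide (p x))) := by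
  intro xs
  induction xs with
  | nil => intro a b; simp
  | cons x xs ih =>
    intro a b
    by_cases h : p x <;> simp [h, ih]

-- filtering commutes with Python's sort of Ints
theorem sorted_filter (q : Int → Bool) (xs : List Int) :
    PySem.List.sorted (xs.filter q) (fun x => x) false
      = (PySem.List.sorted xs (fun x => x) false).filter q := by
  apply PySem.List.sorted_id_eq_of_perm_of_pairwise
  · exact (PySem.List.sorted_perm xs (fun x => x) false).filter q
  · exact List.Pairwise.sublist (List.filter_sublist)
      (PySem.List.sorted_pairwise xs (fun x => x))

-- ===== VERDICT (by name: the statement is the Claim_ definition above) =====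
theorem reOrderArray_spec : Claim_equal_reOrderArray := by
  intro array _
  show reOrderArray array = reOrderArray_alt array
  unfold reOrderArray reOrderArray_alt
  simp only []
  rw [PySem.List.foldl_pyRange_zero_pyGetD' array 0
      (fun (s : List Int × List Int) x =>
        if PySem.Int.mod x 2 = 0 then (s.1 ++ [x], s.2) else (s.1, s.2 ++ [x]))
      ([], [])]
  rw [foldl_partition (fun x => PySem.Int.mod x 2 = 0) array [] [],
      foldl_partition (fun x => PySem.Int.mod x 2 ≠ 0) _ [] []]
  simp only [List.nil_append]
  rw [sorted_filter, sorted_filter]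
  simp only [ne_eq, decide_not, Bool.not_not]
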